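-- pv_equiv track=rewrite | github.com/deadl0ck/SigenSmartControl | main.py | order_daytime_periods
-- ===== SOURCE A (Python) =====
-- _CANONICAL_DAYTIME_PERIOD_ORDER: tuple[str, ...] = ("Morn", "Aftn", "Eve")
--
-- def order_daytime_periods(period_forecast: dict[str, tuple[int, str]]) -> list[str]:
--     """Return daytime periods in deterministic scheduler order.
--
--     Args:
--         period_forecast: Mapping of period labels to forecast tuples.
--
--     Returns:
--         Ordered daytime period list. Known periods are returned as Morn, Aftn,
--         Eve when present. Any additional daytime labels are appended in
--         alphabetical order for deterministic behavior.
--     """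
--     known = [period for period in _CANONICAL_DAYTIME_PERIOD_ORDER if period in period_forecast]
--     extras = sorted(
--         period
--         for period in period_forecast
--         if period.upper() != "NIGHT" and period not in _CANONICAL_DAYTIME_PERIOD_ORDER
--     )
--     return known + extras
-- ===== SOURCE B (Python) =====
-- _CANONICAL_DAYTIME_PERIOD_ORDER: tuple[str, ...] = ("Morn", "Aftn", "Eve")
--
-- def order_daytime_periods(period_forecast: dict[str, tuple[int, str]]) -> list[str]:
--     """Single sorted() pass over all non-NIGHT labels with a composite key:
--     canonical labels rank by their position in the canonical tuple (tie-break
--     empty), all other labels rank after them, tie-broken alphabetically."""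
--     def rank(period: str) -> tuple[int, str]:
--         if period in _CANONICAL_DAYTIME_PERIOD_ORDER:
--             return (_CANONICAL_DAYTIME_PERIOD_ORDER.index(period), "")
--         return (len(_CANONICAL_DAYTIME_PERIOD_ORDER), period)
--
--     return sorted(
--         (period for period in period_forecast if period.upper() != "NIGHT"),
--         key=rank,
--     )
-- ===== Notes on version B (the rewrite author's own statement) =====
-- stated objective: alternative
-- what changed: A's two passes (filter the canonical tuple by dict membership, then sort the remaining labels) and list concatenation are replaced by one sorted() call over all non-NIGHT labels with a composite key (canonical position, then label), so the canonical-first order falls out of a single sort.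
import Mathlib
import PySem

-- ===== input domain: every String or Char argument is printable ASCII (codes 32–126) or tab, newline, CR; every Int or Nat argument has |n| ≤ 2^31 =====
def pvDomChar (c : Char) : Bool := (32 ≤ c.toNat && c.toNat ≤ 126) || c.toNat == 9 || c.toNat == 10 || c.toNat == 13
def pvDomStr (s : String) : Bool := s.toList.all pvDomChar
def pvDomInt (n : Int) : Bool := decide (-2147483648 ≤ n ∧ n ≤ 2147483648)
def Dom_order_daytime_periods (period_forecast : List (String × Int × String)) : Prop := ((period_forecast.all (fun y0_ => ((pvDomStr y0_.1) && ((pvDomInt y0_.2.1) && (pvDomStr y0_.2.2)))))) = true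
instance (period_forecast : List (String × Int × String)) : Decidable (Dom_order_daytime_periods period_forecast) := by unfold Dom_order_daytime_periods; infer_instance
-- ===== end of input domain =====

-- B replaces A's two passes (filter the canonical tuple by membership, then sort the rest)
-- and concatenation with one sorted() over all non-NIGHT labels under a composite
-- (canonical-position, label) key: a different decomposition of the same task, same cost.


-- ===== PORT A =====
-- _CANONICAL_DAYTIME_PERIOD_ORDER
def pvCanon : List String := ["Morn", "Aftn", "Eve"]

def order_daytime_periods (period_forecast : List (String × Int × String)) : List String :=
  let keys := period_forecast.map Prod.fst
  let known := pvCanon.filter (fun period => keys.contains period)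
  let extras := PySem.List.sorted
    (keys.filter (fun period =>
      (PySem.Str.upper period != "NIGHT") && !(pvCanon.contains period)))
    (fun x => x)
  known ++ extras

-- ===== PORT B =====
-- rank(period): Source B's composite sort key
def pvRankKey (period : String) : Int × String :=
  if pvCanon.contains period then ((PySem.List.index? pvCanon period).getD 0, "")
  else ((pvCanon.length : Int), period)

def order_daytime_periods_alt (period_forecast : List (String × Int × String)) : List String :=
  PySem.List.sorted2
    ((period_forecast.map Prod.fst).filter (fun period => PySem.Str.upper period != "NIGHT"))
    (fun period => (pvRankKey period).1) (fun period => (pvRankKey period).2)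

-- ===== PRECONDITION & SPEC =====
-- Pre_: the association list encodes a Python dict, so its keys are pairwise distinct;
-- a duplicate-key list corresponds to no dict input of the Python programs (in Python both
-- functions take the dict itself, where duplicate keys cannot occur).
def Pre_order_daytime_periods (period_forecast : List (String × Int × String)) : Prop :=
  (period_forecast.map Prod.fst).Nodup
instance (period_forecast : List (String × Int × String)) : Decidable (Pre_order_daytime_periods period_forecast) := by unfold Pre_order_daytime_periods; infer_instance

def pvWitness_order_daytime_periods : (List (String × Int × String)) :=
  [("Night", 1, "a"), ("Eve", 2, "b"), ("Dawn", 3, "c"), ("Morn", 4, "d")]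

def Spec_order_daytime_periods (period_forecast : List (String × Int × String)) (out : List String) : Prop := out = order_daytime_periods_alt period_forecast
instance (period_forecast : List (String × Int × String)) (out : List String) : Decidable (Spec_order_daytime_periods period_forecast out) := by unfold Spec_order_daytime_periods; infer_instance

-- ===== CLAIM (what is proved, stated in full; the proofs are below) =====
def Claim_equal_order_daytime_periods : Prop := ∀ (period_forecast : List (String × Int × String)), Dom_order_daytime_periods period_forecast → Pre_order_daytime_periods period_forecast → Spec_order_daytime_periods period_forecast (order_daytime_periods period_forecast)

-- ===== LEMMAS AND PROOFS =====

-- The strict order B's composite key imposes.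
def pvLexLt (a b : String) : Prop :=
  (pvRankKey a).1 < (pvRankKey b).1 ∨ ((pvRankKey a).1 = (pvRankKey b).1 ∧ (pvRankKey a).2 < (pvRankKey b).2)

-- sorted2 (reverse := false) with Int/String keys is the sort by the lexicographic composite
-- key: any strictly key-increasing rearrangement of xs is its value.
theorem sorted2_eq_of_perm_of_pairwise_lexlt {α : Type} (xs ys : List α) (k1 : α → Int) (k2 : α → String)
    (hp : ys.Perm xs)
    (hpw : ys.Pairwise (fun a b => k1 a < k1 b ∨ (k1 a = k1 b ∧ k2 a < k2 b))) :
    PySem.List.sorted2 xs k1 k2 = ys := by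
  have hlex : ∀ a b : α, (k1 a < k1 b ∨ (¬ k1 b < k1 a ∧ k2 a < k2 b)) ↔
      toLex (k1 a, k2 a) < toLex (k1 b, k2 b) := by
    intro a b
    rw [Prod.Lex.lt_iff]
    simp only [ofLex_toLex]
    constructor
    · rintro (h | ⟨h1, h2⟩)
      · exact Or.inl h
      · rcases lt_or_eq_of_le (not_lt.mp h1) with h' | h'
        · exact Or.inl h'
        · exact Or.inr ⟨h', h2⟩
    · rintro (h | ⟨h1, h2⟩)
      · exact Or.inl h
      · exact Or.inr ⟨not_lt.mpr (le_of_eq h1), h2⟩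
  have hkey : PySem.List.sorted2 xs k1 k2 =
      PySem.List.sorted xs (fun a => toLex (k1 a, k2 a)) := by
    show List.foldl _ [] xs = List.foldl _ [] xs
    have hb : (fun a b => decide (k1 a < k1 b) || (!decide (k1 b < k1 a) && decide (k2 a < k2 b)))
        = (fun a b : α => decide (toLex (k1 a, k2 a) < toLex (k1 b, k2 b))) := by
      funext a b
      by_cases hq : toLex (k1 a, k2 a) < toLex (k1 b, k2 b)
      · rw [decide_eq_true hq]
        rcases (hlex a b).mpr hq with h | ⟨h1, h2⟩
        · rw [decide_eq_true h, Bool.true_or]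
        · rw [decide_eq_false h1, Bool.not_false, decide_eq_true h2, Bool.true_and]
          simp
      · rw [decide_eq_false hq]
        have hL : ∀ h : k1 a < k1 b ∨ (¬ k1 b < k1 a ∧ k2 a < k2 b), False :=
          fun h => hq ((hlex a b).mp h)
        have hn1 : ¬ k1 a < k1 b := fun h => hL (Or.inl h)
        rw [decide_eq_false hn1, Bool.false_or]
        by_cases h2 : k1 b < k1 a
        · rw [decide_eq_true h2]; simp
        · have hn3 : ¬ k2 a < k2 b := fun h => hL (Or.inr ⟨h2, h⟩)
          rw [decide_eq_false h2, decide_eq_false hn3]; simp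
    simp only [hb, Bool.false_eq_true, if_false]
  rw [hkey]
  apply PySem.List.sorted_eq_of_perm_of_pairwise_lt _ _ _ hp
  refine hpw.imp ?_
  intro a b h
  exact (hlex a b).mp (h.imp id fun ⟨h1, h2⟩ => ⟨not_lt.mpr (le_of_eq h1), h2⟩)

-- canonical labels are never "NIGHT" under upper
theorem pv_canon_nonnight (p : String) (hc : pvCanon.contains p = true) :
    (PySem.Str.upper p != "NIGHT") = true := by
  have : p ∈ pvCanon := by simpa using hc
  fin_cases this <;> decide

theorem order_daytime_periods_eq (pf : List (String × Int × String))
    (h : (pf.map Prod.fst).Nodup) :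
    order_daytime_periods pf = order_daytime_periods_alt pf := by
  unfold order_daytime_periods order_daytime_periods_alt
  set ks := pf.map Prod.fst with hks
  set nn : String → Bool := fun p => PySem.Str.upper p != "NIGHT" with hnn
  set cb : String → Bool := fun p => pvCanon.contains p with hcb
  set known := pvCanon.filter (fun period => ks.contains period) with hknown
  set extras := ks.filter (fun period => nn period && !cb period) with hextras
  set fs := ks.filter nn with hfs
  set sE := PySem.List.sorted extras (fun x => x) with hsE
  -- facts
  have hnodup_extras : extras.Nodup := h.filter _
  have hperm_sE : sE.Perm extras := PySem.List.sorted_perm extras (fun x => x) false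
  have hknown_perm : known.Perm (fs.filter cb) := by
    have hknown_nd : known.Nodup := (by decide : pvCanon.Nodup).filter _
    have hfs_nd : (fs.filter cb).Nodup := (h.filter _).filter _
    refine (List.perm_ext_iff_of_nodup hknown_nd hfs_nd).mpr ?_
    intro a
    simp only [hknown, hfs, List.mem_filter]
    constructor
    · rintro ⟨hca, hma⟩
      have hc : cb a = true := by simp [hcb, hca]
      exact ⟨⟨by simpa using hma, pv_canon_nonnight a (by simpa [hcb] using hc)⟩, hc⟩
    · rintro ⟨⟨hma, _⟩, hc⟩
      exact ⟨by simpa [hcb] using hc, by simpa using hma⟩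
  have hextras_eq : extras = fs.filter (fun p => !cb p) := by
    rw [hfs, List.filter_filter]
    apply List.filter_congr
    intro p _
    simp [Bool.and_comm]
  have hperm : (known ++ sE).Perm fs := by
    refine (hknown_perm.append (hperm_sE.trans (by rw [hextras_eq]))).trans ?_
    exact List.filter_append_perm cb fs
  -- pairwise
  have hpw : (known ++ sE).Pairwise pvLexLt := by
    rw [List.pairwise_append]
    refine ⟨?_, ?_, ?_⟩
    · refine List.Pairwise.sublist List.filter_sublist ?_
      unfold pvLexLt
      decide
    · have hle : sE.Pairwise (fun a b : String => a ≤ b) :=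
        PySem.List.sorted_pairwise extras (fun x => x)
      have hne : sE.Pairwise (fun a b : String => a ≠ b) := hperm_sE.symm.nodup hnodup_extras
      have hand := hle.and hne
      refine hand.imp_of_mem ?_
      intro a b hma hmb ⟨hab, hne'⟩
      have hca : cb a = false := by
        have := List.of_mem_filter (by simpa [hsE, PySem.List.mem_sorted] using hma : a ∈ extras)
        simp only [Bool.and_eq_true, Bool.not_eq_true'] at this
        exact this.2
      have hcbb : cb b = false := by
        have := List.of_mem_filter (by simpa [hsE, PySem.List.mem_sorted] using hmb : b ∈ extras)
        simp only [Bool.and_eq_true, Bool.not_eq_true'] at this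
        exact this.2
      right
      constructor
      · simp [pvRankKey, hcb] at hca hcbb ⊢
        simp [hca, hcbb]
      · simp only [pvRankKey]
        rw [if_neg (by simp [hcb] at hca; simp [hca]), if_neg (by simp [hcb] at hcbb; simp [hcbb])]
        exact lt_of_le_of_ne hab hne'
    · intro a hma b hmb
      have hca : a ∈ pvCanon := List.mem_of_mem_filter hma
      have hcbb : cb b = false := by
        have := List.of_mem_filter (by simpa [hsE, PySem.List.mem_sorted] using hmb : b ∈ extras)
        simp only [Bool.and_eq_true, Bool.not_eq_true'] at this
        exact this.2
      left
      have h3 : (pvRankKey b).1 = 3 := by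
        simp [hcb] at hcbb
        simp [pvRankKey, hcbb]
        decide
      rw [h3]
      fin_cases hca <;> decide
  exact (sorted2_eq_of_perm_of_pairwise_lexlt fs (known ++ sE) _ _ hperm hpw).symm

-- ===== VERDICT (by name: the statement is the Claim_ definition above) =====
theorem order_daytime_periods_spec : Claim_equal_order_daytime_periods := by
  intro pf _ hpre
  exact order_daytime_periods_eq pf hpre
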